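-- pv_equiv track=rewrite | github.com/PlinioRPereira/uartDecoder | decoder.py | findTransmitionWindow
-- ===== SOURCE A (Python) =====
-- def findTransmitionWindow(binary_array, raiseAndFallEdgesQtd):
--     window_start = None
--     window_end = None
--     transitions = 0
--     startPrefixSamplesQtd = 50            # Add 50 samples before window_start to facilitate decoding
--
--     for i in range(len(binary_array) - 1):
--         if binary_array[i] != binary_array[i + 1]:
--             transitions += 1
--
--             if transitions == 1:
--                 window_start = i
--
--             if transitions == raiseAndFallEdgesQtd:
--                 window_end = i
--                 break
--
--     if(window_start > startPrefixSamplesQtd):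
--         window_start = window_start - startPrefixSamplesQtd
--
--     return window_start, window_end
-- ===== SOURCE B (Python) =====
-- def findTransmitionWindow(binary_array, raiseAndFallEdgesQtd):
--     startPrefixSamplesQtd = 50
--     transitions = [i for i in range(len(binary_array) - 1)
--                    if binary_array[i] != binary_array[i + 1]]
--     if not transitions:
--         return None, None
--     window_start = transitions[0]
--     if 1 <= raiseAndFallEdgesQtd <= len(transitions):
--         window_end = transitions[raiseAndFallEdgesQtd - 1]
--     else:
--         window_end = None
--     if window_start > startPrefixSamplesQtd:
--         window_start -= startPrefixSamplesQtd
--     return window_start, window_end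
-- ===== Notes on version B (the rewrite author's own statement) =====
-- stated objective: simpler
-- what changed: B materialises the list of all transition indices once and reads window_start/window_end off it by direct indexing, replacing A's counter-and-break state machine; where A crashes comparing None > 50 (no transitions) B returns (None, None).
-- crash fix: On arrays with no adjacent transition (empty, single-element or locally constant) A raises TypeError from 'window_start > 50' with window_start None; B returns (None, None). — e.g. on findTransmitionWindow([1, 1], 1): A raises TypeError, B returns (none, none)
import Mathlib
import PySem

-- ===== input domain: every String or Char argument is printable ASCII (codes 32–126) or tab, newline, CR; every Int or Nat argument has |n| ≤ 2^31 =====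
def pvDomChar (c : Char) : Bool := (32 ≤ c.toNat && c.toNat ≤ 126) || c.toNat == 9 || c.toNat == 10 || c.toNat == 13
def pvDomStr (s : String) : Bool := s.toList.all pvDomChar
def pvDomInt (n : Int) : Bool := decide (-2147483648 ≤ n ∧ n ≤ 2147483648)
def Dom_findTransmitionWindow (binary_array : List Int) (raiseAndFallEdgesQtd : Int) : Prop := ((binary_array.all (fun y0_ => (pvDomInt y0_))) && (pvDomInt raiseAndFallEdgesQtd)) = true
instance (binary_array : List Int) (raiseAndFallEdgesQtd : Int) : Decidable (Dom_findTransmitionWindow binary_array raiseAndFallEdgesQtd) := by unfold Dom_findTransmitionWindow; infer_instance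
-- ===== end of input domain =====

-- B builds the full transition-index list once and indexes into it, instead of A's
-- counter/break loop; same values wherever A returns (objective: simpler decomposition).

-- ===== PORT A =====
-- The for-loop over range(len-1): comparing binary_array[i] with binary_array[i+1] is
-- walking adjacent pairs, transcribed as recursion on the list carrying the index i and
-- the loop state (window_start, window_end, transitions); the `break` is the early return.
def findTWLoopA (l : List Int) (i : Int) (ws we : Option Int) (t q : Int) :
    Option Int × Option Int :=
  match l with
  | a :: b :: rest =>
    if a ≠ b then
      let t' := t + 1
      let ws' := if t' = 1 then some i else ws
      if t' = q then (ws', some i)          -- break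
      else findTWLoopA (b :: rest) (i + 1) ws' we t' q
    else findTWLoopA (b :: rest) (i + 1) ws we t q
  | _ => (ws, we)

def findTransmitionWindow (binary_array : List Int) (raiseAndFallEdgesQtd : Int) : Option Int × Option Int :=
  let r := findTWLoopA binary_array 0 none none 0 raiseAndFallEdgesQtd
  match r.1 with
  | some s => (if s > 50 then some (s - 50) else some s, r.2)
  | none => (none, r.2)   -- Python raises TypeError (None > 50) here; excluded by Pre_

-- ===== PORT B =====
-- the comprehension [i for i in range(len-1) if l[i] != l[i+1]], as the same adjacent-pair walk
def findTWTransitions (l : List Int) (i : Int) : List Int :=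
  match l with
  | a :: b :: rest =>
    (if a ≠ b then [i] else []) ++ findTWTransitions (b :: rest) (i + 1)
  | _ => []

def findTransmitionWindow_alt (binary_array : List Int) (raiseAndFallEdgesQtd : Int) : Option Int × Option Int :=
  let ts := findTWTransitions binary_array 0
  match ts with
  | [] => (none, none)
  | s :: _ =>
    let we := if 1 ≤ raiseAndFallEdgesQtd ∧ raiseAndFallEdgesQtd ≤ (ts.length : Int)
              then PySem.List.pyGet? ts (raiseAndFallEdgesQtd - 1) else none
    (if s > 50 then some (s - 50) else some s, we)

-- ===== PRECONDITION & SPEC =====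
-- Pre_ excludes exactly the inputs with no adjacent transition (empty, singleton or
-- locally-constant arrays), on which A raises TypeError comparing None > 50.
def Pre_findTransmitionWindow (binary_array : List Int) (raiseAndFallEdgesQtd : Int) : Prop :=
  ∃ p ∈ binary_array.zip binary_array.tail, p.1 ≠ p.2
instance (binary_array : List Int) (raiseAndFallEdgesQtd : Int) : Decidable (Pre_findTransmitionWindow binary_array raiseAndFallEdgesQtd) := by unfold Pre_findTransmitionWindow; infer_instance

def pvWitness_findTransmitionWindow : List Int × Int := ([0, 1, 1, 0], 2)

-- On arrays with no adjacent transition A raises TypeError ('>' between NoneType and int); B returns (None, None).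
def Raises_findTransmitionWindow (binary_array : List Int) (raiseAndFallEdgesQtd : Int) : Prop :=
  ∀ p ∈ binary_array.zip binary_array.tail, p.1 = p.2
instance (binary_array : List Int) (raiseAndFallEdgesQtd : Int) : Decidable (Raises_findTransmitionWindow binary_array raiseAndFallEdgesQtd) := by unfold Raises_findTransmitionWindow; infer_instance
def pvRaiseWitness_findTransmitionWindow : List Int × Int := ([1, 1], 1)
def pvRaiseWitnessOut_findTransmitionWindow : Option Int × Option Int := (none, none)

def Spec_findTransmitionWindow (binary_array : List Int) (raiseAndFallEdgesQtd : Int) (out : Option Int × Option Int) : Prop := out = findTransmitionWindow_alt binary_array raiseAndFallEdgesQtd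
instance (binary_array : List Int) (raiseAndFallEdgesQtd : Int) (out : Option Int × Option Int) : Decidable (Spec_findTransmitionWindow binary_array raiseAndFallEdgesQtd out) := by unfold Spec_findTransmitionWindow; infer_instance

-- ===== CLAIM (what is proved, stated in full; the proofs are below) =====
def Claim_equal_findTransmitionWindow : Prop := ∀ (binary_array : List Int) (raiseAndFallEdgesQtd : Int), Dom_findTransmitionWindow binary_array raiseAndFallEdgesQtd → Pre_findTransmitionWindow binary_array raiseAndFallEdgesQtd → Spec_findTransmitionWindow binary_array raiseAndFallEdgesQtd (findTransmitionWindow binary_array raiseAndFallEdgesQtd)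

def Claim_raises_findTransmitionWindow : Prop := (∀ (binary_array : List Int) (raiseAndFallEdgesQtd : Int), Dom_findTransmitionWindow binary_array raiseAndFallEdgesQtd → Raises_findTransmitionWindow binary_array raiseAndFallEdgesQtd → ¬ Pre_findTransmitionWindow binary_array raiseAndFallEdgesQtd) ∧ (Dom_findTransmitionWindow (pvRaiseWitness_findTransmitionWindow.1) (pvRaiseWitness_findTransmitionWindow.2) ∧ Raises_findTransmitionWindow (pvRaiseWitness_findTransmitionWindow.1) (pvRaiseWitness_findTransmitionWindow.2) ∧ findTransmitionWindow_alt (pvRaiseWitness_findTransmitionWindow.1) (pvRaiseWitness_findTransmitionWindow.2) = pvRaiseWitnessOut_findTransmitionWindow)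

-- ===== LEMMAS AND PROOFS =====

-- The transitions list is empty iff every adjacent pair of the array is equal.
theorem findTWTransitions_eq_nil_iff (l : List Int) (i : Int) :
    findTWTransitions l i = [] ↔ ∀ p ∈ l.zip l.tail, p.1 = p.2 := by
  induction l generalizing i with
  | nil => simp [findTWTransitions]
  | cons a l ih =>
    cases l with
    | nil => simp [findTWTransitions]
    | cons b rest =>
      by_cases h : a = b <;>
        simp [findTWTransitions, h, ih (i + 1)]

-- Once at least one transition has been seen (t ≥ 1, ws fixed), the loop never touches
-- ws again and window_end is the (q - t)-th transition of the remainder, if it exists.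
theorem findTWLoopA_started (l : List Int) (q : Int) :
    ∀ (i t : Int) (ws : Option Int), 1 ≤ t →
    findTWLoopA l i ws none t q =
      (ws,
       if t < q ∧ q ≤ t + (findTWTransitions l i).length
       then PySem.List.pyGet? (findTWTransitions l i) (q - t - 1) else none) := by
  induction l with
  | nil =>
    intro i t ws ht
    simp only [findTWLoopA, findTWTransitions, List.length_nil, Nat.cast_zero, add_zero]
    rw [if_neg (by omega)]
  | cons a l ih =>
    intro i t ws ht
    cases l with
    | nil =>
      simp only [findTWLoopA, findTWTransitions, List.length_nil, Nat.cast_zero, add_zero]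
      rw [if_neg (by omega)]
    | cons b rest =>
      by_cases h : a = b
      · simpa [findTWLoopA, findTWTransitions, h] using ih (i + 1) t ws ht
      · simp only [findTWLoopA, findTWTransitions, h, ne_eq, not_false_iff, if_true,
          List.singleton_append]
        by_cases hq : t + 1 = q
        · subst hq
          have hne1 : ¬ (t + 1 = 1) := by omega
          rw [if_neg hne1, if_pos (rfl : t + 1 = t + 1)]
          have hc : t < t + 1 ∧ t + 1 ≤ t + ((i :: findTWTransitions (b :: rest) (i + 1)).length : Int) := ⟨by omega, by simp⟩
          rw [if_pos hc]
          have hidx : t + 1 - t - 1 = ((0 : Nat) : Int) := by simp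
          rw [hidx, PySem.List.pyGet?_natCast]
          rfl
        · rw [if_neg hq, ih (i + 1) (t + 1) (if t + 1 = 1 then some i else ws) (by omega)]
          have hws : (if t + 1 = 1 then some i else ws) = ws := by
            have : ¬ t + 1 = 1 := by omega
            simp [this]
          rw [hws]
          congr 1
          by_cases hlt : t < q ∧ q ≤ t + ((i :: findTWTransitions (b :: rest) (i + 1)).length : Int)
          · have hlt' : t + 1 < q ∧ q ≤ t + 1 + ((findTWTransitions (b :: rest) (i + 1)).length : Int) := by
              simp at hlt ⊢; omega
            rw [if_pos hlt, if_pos hlt']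
            obtain ⟨k, hk⟩ := Int.eq_ofNat_of_zero_le (show (0:Int) ≤ q - t - 2 by omega)
            have h1 : q - (t + 1) - 1 = ((k : Nat) : Int) := by omega
            have h2 : q - t - 1 = (((k + 1 : Nat)) : Int) := by push_cast at hk ⊢; omega
            rw [h1, h2, PySem.List.pyGet?_natCast, PySem.List.pyGet?_natCast]
            simp
          · have hlt' : ¬ (t + 1 < q ∧ q ≤ t + 1 + ((findTWTransitions (b :: rest) (i + 1)).length : Int)) := by
              simp at hlt ⊢; omega
            rw [if_neg hlt, if_neg hlt']

-- Characterisation of the whole A-loop from the fresh state.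
theorem findTWLoopA_start (l : List Int) (i q : Int) :
    findTWLoopA l i none none 0 q =
      ((findTWTransitions l i).head?,
       if 1 ≤ q ∧ q ≤ ((findTWTransitions l i).length : Int)
       then PySem.List.pyGet? (findTWTransitions l i) (q - 1) else none) := by
  induction l generalizing i with
  | nil =>
    simp only [findTWLoopA, findTWTransitions, List.length_nil, Nat.cast_zero, List.head?]
    rw [if_neg (by omega)]
  | cons a l ih =>
    cases l with
    | nil =>
      simp only [findTWLoopA, findTWTransitions, List.length_nil, Nat.cast_zero, List.head?]
      rw [if_neg (by omega)]
    | cons b rest =>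
      by_cases h : a = b
      · simpa [findTWLoopA, findTWTransitions, h] using ih (i + 1)
      · simp only [findTWLoopA, findTWTransitions, h, ne_eq, not_false_iff, if_true,
          List.singleton_append, zero_add]
        by_cases hq : (1:Int) = q
        · subst hq
          rw [if_pos rfl]
          rw [if_pos (⟨le_rfl, by simp⟩ : (1:Int) ≤ 1 ∧ (1:Int) ≤ ((i :: findTWTransitions (b :: rest) (i + 1)).length : Int))]
          have hidx : (1:Int) - 1 = ((0 : Nat) : Int) := by simp
          rw [hidx, PySem.List.pyGet?_natCast]
          rfl
        · rw [if_neg hq,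
            findTWLoopA_started (b :: rest) q (i + 1) 1 (some i) le_rfl]
          simp only [List.head?]
          congr 1
          by_cases hlt : 1 ≤ q ∧ q ≤ ((i :: findTWTransitions (b :: rest) (i + 1)).length : Int)
          · have hlt' : 1 < q ∧ q ≤ 1 + ((findTWTransitions (b :: rest) (i + 1)).length : Int) := by
              simp at hlt ⊢; omega
            rw [if_pos hlt, if_pos hlt']
            obtain ⟨k, hk⟩ := Int.eq_ofNat_of_zero_le (show (0:Int) ≤ q - 2 by omega)
            have h1 : q - 1 - 1 = ((k : Nat) : Int) := by omega
            have h2 : q - 1 = (((k + 1 : Nat)) : Int) := by push_cast at hk ⊢; omega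
            rw [h1, h2, PySem.List.pyGet?_natCast, PySem.List.pyGet?_natCast]
            simp
          · have hlt' : ¬ (1 < q ∧ q ≤ 1 + ((findTWTransitions (b :: rest) (i + 1)).length : Int)) := by
              simp at hlt ⊢; omega
            rw [if_neg hlt, if_neg hlt']

-- ===== VERDICT (by name: the statement is the Claim_ definition above) =====
theorem findTransmitionWindow_spec : Claim_equal_findTransmitionWindow := by
  intro l q _ hpre
  unfold Spec_findTransmitionWindow findTransmitionWindow findTransmitionWindow_alt
  rw [findTWLoopA_start]
  have hne : findTWTransitions l 0 ≠ [] := by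
    rw [ne_eq, findTWTransitions_eq_nil_iff]
    unfold Pre_findTransmitionWindow at hpre
    intro hall
    obtain ⟨p, hp, hne2⟩ := hpre
    exact hne2 (hall p hp)
  obtain ⟨s, ts, hts⟩ := List.exists_cons_of_ne_nil hne
  rw [hts]
  simp

theorem findTransmitionWindow_raises : Claim_raises_findTransmitionWindow := by
  unfold Claim_raises_findTransmitionWindow
  constructor
  · intro l q _ hr hp
    unfold Raises_findTransmitionWindow at hr
    unfold Pre_findTransmitionWindow at hp
    obtain ⟨p, hp1, hne⟩ := hp
    exact hne (hr p hp1)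
  · decide

-- witness self-check: the raise-witness really lies in the Raises_ region (read off the theorem above)
theorem pvRaiseWitness_findTransmitionWindow_ok :
    Raises_findTransmitionWindow pvRaiseWitness_findTransmitionWindow.1 pvRaiseWitness_findTransmitionWindow.2 :=
  findTransmitionWindow_raises.2.2.1
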